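-- pv_equiv track=rewrite | github.com/6puritans9/codetree-TILs | 250329/숫자들의 합 중 최대/maximum-of-sum-of-numbers.py | find_max_digit_sum
-- ===== SOURCE A (Python) =====
-- def find_max_digit_sum(x:int, y:int) -> int:
--     # TC = O(y-x+1)
--     # SC = O(1)
--
--     max_digit_sum = 0
--
--     for n in range(x, y+1):
--         number = n
--         digit_sum = 0
--
--         while number:
--             digit_sum += number % 10
--             number //= 10
--
--         max_digit_sum = max(max_digit_sum, digit_sum)
--
--     return max_digit_sum
-- ===== SOURCE B (Python) =====
-- def _ds(n):
--     return 0 if n <= 0 else n % 10 + _ds(n // 10)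
--
--
-- def _g(x, y):
--     # max digit sum over [x, y], assuming 0 <= x <= y
--     if y < 10:
--         return y
--     best = _ds(y)
--     if x // 10 < y // 10:
--         best = max(best, 9 + _g(x // 10, y // 10 - 1))
--     return best
--
--
-- def find_max_digit_sum(x: int, y: int) -> int:
--     if x > y:
--         return 0
--     return _g(x, y)
-- ===== Notes on version B (the rewrite author's own statement) =====
-- stated objective: faster
-- what changed: Replaced the brute-force scan of every integer in [x,y] (digit-summing each) by a digit-wise recursion on y: the maximum digit sum over [x,y] is max(digitsum(y), 9 + maximum over the quotient interval [x//10, y//10-1]), giving O(log^2 y) instead of O((y-x) log y).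
import Mathlib
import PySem

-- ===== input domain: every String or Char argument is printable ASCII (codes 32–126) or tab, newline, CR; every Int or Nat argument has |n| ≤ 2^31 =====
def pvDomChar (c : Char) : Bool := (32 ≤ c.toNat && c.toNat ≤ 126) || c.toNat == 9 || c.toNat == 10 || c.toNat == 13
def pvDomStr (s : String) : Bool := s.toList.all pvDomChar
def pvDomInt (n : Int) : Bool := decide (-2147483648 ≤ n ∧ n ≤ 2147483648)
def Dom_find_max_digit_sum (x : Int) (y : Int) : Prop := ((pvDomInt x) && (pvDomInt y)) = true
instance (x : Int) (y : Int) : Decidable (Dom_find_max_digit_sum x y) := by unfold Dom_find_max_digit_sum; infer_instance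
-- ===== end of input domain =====

-- B replaces A's brute-force scan of [x,y] by a digit-wise recursion on y (lower a digit, pad 9s), asymptotically faster.


-- ===== PORT A =====
-- A's inner 'while number:' loop; the fuel argument only makes it total (64 exceeds the
-- decimal length of every |n| ≤ 2^31, so on the admitted domain the loop is exactly Python's).
def pvDsLoop : Nat → Int → Int → Int
  | 0, _, ds => ds
  | fuel+1, number, ds =>
    if number ≠ 0 then pvDsLoop fuel (PySem.Int.floordiv number 10) (ds + PySem.Int.mod number 10)
    else ds

def find_max_digit_sum (x : Int) (y : Int) : Int :=
  (PySem.List.pyRange x (y + 1) 1).foldl (fun maxds n => max maxds (pvDsLoop 64 n 0)) 0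

-- ===== PORT B =====
-- Source B's _ds
def pvDs (n : Int) : Int :=
  if n ≤ 0 then 0 else PySem.Int.mod n 10 + pvDs (PySem.Int.floordiv n 10)
termination_by n.toNat
decreasing_by
  rw [PySem.Int.floordiv_eq_ediv_of_pos (by norm_num : (0:Int) < 10)]
  omega

-- Source B's _g
def pvG (x : Int) (y : Int) : Int :=
  if y < 10 then y
  else
    let best := pvDs y
    if PySem.Int.floordiv x 10 < PySem.Int.floordiv y 10 then
      max best (9 + pvG (PySem.Int.floordiv x 10) (PySem.Int.floordiv y 10 - 1))
    else best
termination_by y.toNat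
decreasing_by
  rw [PySem.Int.floordiv_eq_ediv_of_pos (by norm_num : (0:Int) < 10)]
  omega

def find_max_digit_sum_alt (x : Int) (y : Int) : Int :=
  if x > y then 0 else pvG x y

-- ===== PRECONDITION & SPEC =====
-- Pre_ excludes exactly the inputs on which A never returns: for x ≤ y with x < 0 the first
-- iteration's 'while number:' loop diverges (Python: -1 // 10 == -1), so A returns only when
-- 0 ≤ x or the range is empty (y < x).
def Pre_find_max_digit_sum (x : Int) (y : Int) : Prop := 0 ≤ x ∨ y < x
instance (x : Int) (y : Int) : Decidable (Pre_find_max_digit_sum x y) := by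
  unfold Pre_find_max_digit_sum; infer_instance

def pvWitness_find_max_digit_sum : Int × Int := (1, 23)

def Spec_find_max_digit_sum (x : Int) (y : Int) (out : Int) : Prop := out = find_max_digit_sum_alt x y
instance (x : Int) (y : Int) (out : Int) : Decidable (Spec_find_max_digit_sum x y out) := by
  unfold Spec_find_max_digit_sum; infer_instance

-- ===== CLAIM (what is proved, stated in full; the proofs are below) =====
def Claim_equal_find_max_digit_sum : Prop := ∀ (x : Int) (y : Int), Dom_find_max_digit_sum x y → Pre_find_max_digit_sum x y → Spec_find_max_digit_sum x y (find_max_digit_sum x y)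

-- ===== LEMMAS AND PROOFS =====

-- the maximum digit sum over [x, y], in the list form A's fold computes
def pvMaxList (x : Int) (y : Int) : Int :=
  ((PySem.List.pyRange x (y + 1) 1).map pvDs).foldl max 0

lemma pvDs_nonneg (n : Int) : 0 ≤ pvDs n := by
  fun_induction pvDs with
  | case1 n h => rfl
  | case2 n h ih =>
    have := PySem.Int.mod_nonneg n (b := 10) (by norm_num)
    omega

lemma pvDsLoop_eq (fuel : Nat) : ∀ (n ds : Int), 0 ≤ n → n < 10 ^ fuel →
    pvDsLoop fuel n ds = ds + pvDs n := by
  induction fuel with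
  | zero =>
    intro n ds h0 h1
    have : n = 0 := by simpa using (by omega : n = 0)
    subst this
    simp [pvDsLoop, pvDs]
  | succ f ih =>
    intro n ds h0 h1
    by_cases hz : n = 0
    · subst hz; simp [pvDsLoop, pvDs]
    · have hpos : 0 < n := lt_of_le_of_ne h0 (Ne.symm hz)
      rw [pvDsLoop]
      simp only [hz, if_pos, ne_eq, not_false_eq_true, if_true]
      rw [PySem.Int.floordiv_eq_ediv_of_pos (by norm_num : (0:Int) < 10),
          PySem.Int.mod_eq_emod_of_pos (by norm_num : (0:Int) < 10)]
      have hq0 : 0 ≤ n / 10 := Int.ediv_nonneg h0 (by norm_num)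
      have hqlt : n / 10 < 10 ^ f := by
        have h10 : (10:Int) ^ (f + 1) = 10 ^ f * 10 := by ring
        have := Int.ediv_le_ediv (by norm_num : (0:Int) < 10) (le_of_lt h1)
        have hdiv : (10 ^ f * 10) / 10 = (10:Int) ^ f := by
          exact Int.mul_ediv_cancel _ (by norm_num)
        by_contra hc
        push_neg at hc
        have : 10 ^ f * 10 ≤ n := by
          calc (10:Int) ^ f * 10 ≤ (n / 10) * 10 := by
                exact mul_le_mul_of_nonneg_right hc (by norm_num)
            _ ≤ n := Int.ediv_mul_le n (by norm_num)
        omega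
      rw [ih (n / 10) (ds + n % 10) hq0 hqlt]
      conv_rhs => rw [pvDs]
      simp only [not_le.mpr hpos, if_neg, not_le, hpos, if_false]
      rw [PySem.Int.floordiv_eq_ediv_of_pos (by norm_num : (0:Int) < 10),
          PySem.Int.mod_eq_emod_of_pos (by norm_num : (0:Int) < 10)]
      ring

lemma pvDs_small {n : Int} (h0 : 0 ≤ n) (h : n < 10) : pvDs n = n := by
  by_cases hz : n = 0
  · subst hz; simp [pvDs]
  · rw [pvDs]
    have hpos : 0 < n := lt_of_le_of_ne h0 (Ne.symm hz)
    simp only [not_le.mpr hpos, if_false]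
    rw [PySem.Int.floordiv_eq_ediv_of_pos (by norm_num : (0:Int) < 10),
        PySem.Int.mod_eq_emod_of_pos (by norm_num : (0:Int) < 10)]
    have : n / 10 = 0 := Int.ediv_eq_zero_of_lt h0 h
    rw [this]
    simp [pvDs]
    omega

lemma pvDs_decomp {m e : Int} (hm : 0 ≤ m) (he0 : 0 ≤ e) (he : e < 10) :
    pvDs (10 * m + e) = pvDs m + e := by
  by_cases hz : 10 * m + e = 0
  · have hm0 : m = 0 := by omega
    have he0' : e = 0 := by omega
    subst hm0; subst he0'
    simp [pvDs]
  · have hpos : 0 < 10 * m + e := by omega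
    rw [pvDs]
    simp only [not_le.mpr hpos, if_false]
    rw [PySem.Int.floordiv_eq_ediv_of_pos (by norm_num : (0:Int) < 10),
        PySem.Int.mod_eq_emod_of_pos (by norm_num : (0:Int) < 10)]
    have hdiv : (10 * m + e) / 10 = m := by omega
    have hmod : (10 * m + e) % 10 = e := by omega
    rw [hdiv, hmod]
    omega

lemma foldl_max_le {l : List Int} {a B : Int} (ha : a ≤ B) (h : ∀ v ∈ l, v ≤ B) :
    l.foldl max a ≤ B := by
  rcases PySem.List.foldl_max_mem l a with hc | hc
  · omega
  · exact h _ hc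

lemma pvDs_decomp' {n : Int} (h : 0 ≤ n) : pvDs n = pvDs (n / 10) + n % 10 := by
  conv_lhs => rw [show n = 10 * (n / 10) + n % 10 by omega]
  exact pvDs_decomp (by omega) (by omega) (by omega)

lemma maxList_le {x y B : Int} (hB : 0 ≤ B)
    (h : ∀ n, x ≤ n → n ≤ y → pvDs n ≤ B) : pvMaxList x y ≤ B := by
  apply foldl_max_le hB
  intro v hv
  simp only [List.mem_map] at hv
  obtain ⟨n, hn, rfl⟩ := hv
  rw [PySem.List.mem_pyRange_one] at hn
  exact h n hn.1 (by omega)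

lemma le_maxList {x y n : Int} (hx : x ≤ n) (hy : n ≤ y) : pvDs n ≤ pvMaxList x y := by
  apply (PySem.List.le_foldl_max _ _).2
  exact List.mem_map_of_mem (by rw [PySem.List.mem_pyRange_one]; omega)

lemma maxList_attained {x y : Int} (hx : 0 ≤ x) (hxy : x ≤ y) :
    ∃ m, x ≤ m ∧ m ≤ y ∧ pvMaxList x y ≤ pvDs m := by
  rcases PySem.List.foldl_max_mem ((PySem.List.pyRange x (y + 1) 1).map pvDs) 0 with hc | hc
  · exact ⟨x, le_refl x, hxy, by rw [pvMaxList, hc]; exact pvDs_nonneg x⟩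
  · simp only [List.mem_map] at hc
    obtain ⟨m, hm, hEq⟩ := hc
    rw [PySem.List.mem_pyRange_one] at hm
    exact ⟨m, hm.1, by omega, by rw [pvMaxList, hEq]⟩

lemma pvMaxList_eq_pvG_aux : ∀ (k : Nat) (y x : Int), y.toNat ≤ k → 0 ≤ x → x ≤ y →
    pvMaxList x y = pvG x y := by
  intro k
  induction k using Nat.strong_induction_on with
  | _ k ih =>
    intro y x hk hx hxy
    by_cases hsmall : y < 10
    · rw [pvG, if_pos hsmall]
      apply le_antisymm
      · apply maxList_le (by omega)
        intro n h1 h2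
        rw [pvDs_small (by omega) (by omega)]
        exact h2
      · calc y = pvDs y := (pvDs_small (by omega) hsmall).symm
          _ ≤ pvMaxList x y := le_maxList hxy le_rfl
    · have hy10 : 10 ≤ y := by omega
      rw [pvG, if_neg (by omega : ¬ y < 10)]
      simp only [PySem.Int.floordiv_eq_ediv_of_pos (by norm_num : (0:Int) < 10)]
      have hdy : pvDs y = pvDs (y / 10) + y % 10 := pvDs_decomp' (by omega)
      by_cases hlt : x / 10 < y / 10
      · rw [if_pos hlt]
        have hm : (y / 10 - 1).toNat < k := by omega
        have hIH : pvMaxList (x / 10) (y / 10 - 1) = pvG (x / 10) (y / 10 - 1) :=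
          ih _ hm (y / 10 - 1) (x / 10) le_rfl (by omega) (by omega)
        rw [← hIH]
        apply le_antisymm
        · apply maxList_le (le_trans (pvDs_nonneg y) (le_max_left _ _))
          intro n h1 h2
          have hdn : pvDs n = pvDs (n / 10) + n % 10 := pvDs_decomp' (by omega)
          by_cases hq : n / 10 = y / 10
          · have : pvDs n ≤ pvDs y := by rw [hdn, hdy, hq]; omega
            exact le_trans this (le_max_left _ _)
          · have hsub : pvDs (n / 10) ≤ pvMaxList (x / 10) (y / 10 - 1) :=
              le_maxList (by omega) (by omega)
            have : pvDs n ≤ 9 + pvMaxList (x / 10) (y / 10 - 1) := by omega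
            exact le_trans this (le_max_right _ _)
        · apply max_le
          · exact le_maxList hxy le_rfl
          · obtain ⟨m, hm1, hm2, hm3⟩ := maxList_attained (x := x / 10) (y := y / 10 - 1)
              (by omega) (by omega)
            have hds : pvDs (10 * m + 9) = pvDs m + 9 :=
              pvDs_decomp (by omega) (by norm_num) (by norm_num)
            have hmem : pvDs (10 * m + 9) ≤ pvMaxList x y :=
              le_maxList (by omega) (by omega)
            omega
      · rw [if_neg hlt]
        have hqeq : x / 10 = y / 10 := by omega
        apply le_antisymm
        · apply maxList_le (pvDs_nonneg y)
          intro n h1 h2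
          have hdn : pvDs n = pvDs (n / 10) + n % 10 := pvDs_decomp' (by omega)
          have hq : n / 10 = y / 10 := by omega
          rw [hdn, hdy, hq]
          omega
        · exact le_maxList hxy le_rfl

-- ===== VERDICT (by name: the statement is the Claim_ definition above) =====
theorem find_max_digit_sum_spec : Claim_equal_find_max_digit_sum := by
  intro x y hdom hpre
  unfold Spec_find_max_digit_sum find_max_digit_sum find_max_digit_sum_alt
  by_cases hxy : x > y
  · rw [if_pos hxy, PySem.List.pyRange_one_eq_nil (by omega)]
    rfl
  · rw [if_neg hxy]
    have hx : 0 ≤ x := by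
      rcases hpre with h | h
      · exact h
      · omega
    have hxy' : x ≤ y := by omega
    have hbound : y ≤ 2147483648 := by
      unfold Dom_find_max_digit_sum pvDomInt at hdom
      simp only [Bool.and_eq_true, decide_eq_true_eq] at hdom
      omega
    have hmap : (PySem.List.pyRange x (y + 1) 1).map (fun n => pvDsLoop 64 n 0)
        = (PySem.List.pyRange x (y + 1) 1).map pvDs := by
      apply List.map_congr_left
      intro n hn
      rw [PySem.List.mem_pyRange_one] at hn
      have hlt64 : n < 10 ^ 64 := by
        have : (2147483649:Int) < 10 ^ 64 := by norm_num
        omega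
      have := pvDsLoop_eq 64 n 0 (by omega) hlt64
      simpa using this
    have hA : (PySem.List.pyRange x (y + 1) 1).foldl (fun maxds n => max maxds (pvDsLoop 64 n 0)) 0
        = pvMaxList x y := by
      rw [pvMaxList, ← hmap, List.foldl_map]
    rw [hA]
    exact pvMaxList_eq_pvG_aux y.toNat y x le_rfl hx hxy'
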